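-- pv_equiv track=rewrite | github.com/ngnsr/cg_lab2 | grid.py | rect_from_strip
-- ===== SOURCE A (Python) =====
-- def rect_from_strip(y1, y2, segments):
--     """Побудова прямокутників між горизонтальними лініями y1 та y2"""
--     rectangles = []
--     segments.sort()
--     i = 0
--     while i < len(segments):
--         x_start = segments[i][0]
--         x_end = segments[i][1]
--         # Об'єднання суміжних відрізків
--         i += 1
--         while i < len(segments) and segments[i][0] <= x_end:
--             x_end = max(x_end, segments[i][1])
--             i += 1
--         rectangles.append(((x_start, y1), (x_end, y2)))
--     return rectangles
-- ===== SOURCE B (Python) =====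
-- def rect_from_strip(y1, y2, segments):
--     """Divide-and-conquer merge of sorted segments into rectangles (alternative decomposition)."""
--     segments.sort()
--     merged = _dc_merge(segments)
--     return [((a, y1), (b, y2)) for (a, b) in merged]
--
--
-- def _dc_merge(segs):
--     if len(segs) <= 1:
--         return list(segs)
--     mid = len(segs) // 2
--     return _combine(_dc_merge(segs[:mid]), _dc_merge(segs[mid:]))
--
--
-- def _combine(left, right):
--     if not left:
--         return list(right)
--     out = left[:-1]
--     cur = left[-1]
--     for (a, b) in right:
--         if a <= cur[1]:
--             cur = (cur[0], max(cur[1], b))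
--         else:
--             out.append(cur)
--             cur = (a, b)
--     out.append(cur)
--     return out
-- ===== Notes on version B (the rewrite author's own statement) =====
-- stated objective: alternative
-- what changed: Replaced A's index-based lookahead while-loop merge with a divide-and-conquer scheme: recursively merge each half of the sorted list and combine the two merged rectangle lists with a linear last-element merge; both mutate `segments` via sort and the equivalence is about the return value.
import Mathlib
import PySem

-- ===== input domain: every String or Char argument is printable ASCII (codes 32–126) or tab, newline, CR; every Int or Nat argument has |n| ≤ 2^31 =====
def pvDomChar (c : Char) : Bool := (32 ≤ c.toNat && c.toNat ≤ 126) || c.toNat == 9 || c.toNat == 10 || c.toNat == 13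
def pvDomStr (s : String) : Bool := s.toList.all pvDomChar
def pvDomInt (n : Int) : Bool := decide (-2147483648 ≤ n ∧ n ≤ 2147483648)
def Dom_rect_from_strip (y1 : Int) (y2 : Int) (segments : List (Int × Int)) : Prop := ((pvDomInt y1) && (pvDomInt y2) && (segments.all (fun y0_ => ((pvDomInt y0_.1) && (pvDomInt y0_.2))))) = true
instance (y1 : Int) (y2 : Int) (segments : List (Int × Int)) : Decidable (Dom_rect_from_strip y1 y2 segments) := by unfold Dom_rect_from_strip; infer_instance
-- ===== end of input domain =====

-- B replaces A's lookahead while-loop merge by a divide-and-conquer merge (alternative decomposition,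
-- same cost); both Pythons sort `segments` in place, the equivalence proved is about the return value.

-- ===== PORT A =====
-- inner while loop: advance over segments while the next start is ≤ the running x_end
def pvInner (xEnd : Int) : List (Int × Int) → Int × List (Int × Int)
  | [] => (xEnd, [])
  | (a, b) :: rest => if a ≤ xEnd then pvInner (max xEnd b) rest else (xEnd, (a, b) :: rest)

theorem pvInner_length (xEnd : Int) (l : List (Int × Int)) :
    (pvInner xEnd l).2.length ≤ l.length := by
  induction l generalizing xEnd with
  | nil => simp [pvInner]
  | cons h t ih =>
      obtain ⟨a, b⟩ := h
      simp only [pvInner]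
      split
      · exact le_trans (ih _) (Nat.le_succ _)
      · simp

-- outer while loop over the sorted list
def pvOuter (y1 y2 : Int) : List (Int × Int) → List ((Int × Int) × (Int × Int))
  | [] => []
  | (a, b) :: rest =>
      ((a, y1), ((pvInner b rest).1, y2)) :: pvOuter y1 y2 (pvInner b rest).2
termination_by l => l.length
decreasing_by
  exact Nat.lt_succ_of_le (pvInner_length b rest)

def rect_from_strip (y1 : Int) (y2 : Int) (segments : List (Int × Int)) : List ((Int × Int) × (Int × Int)) :=
  pvOuter y1 y2 (PySem.List.sorted2 segments (fun p => p.1) (fun p => p.2))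

-- ===== PORT B =====
-- the `for (a,b) in right` loop of _combine: cur is the mutable last element of out
def pvScanGo (cur : Int × Int) : List (Int × Int) → List (Int × Int)
  | [] => [cur]
  | (a, b) :: rs => if a ≤ cur.2 then pvScanGo (cur.1, max cur.2 b) rs else cur :: pvScanGo (a, b) rs

def pvCombine (left right : List (Int × Int)) : List (Int × Int) :=
  match left with
  | [] => right
  | _ :: _ => left.dropLast ++ pvScanGo (left.getLastD (0, 0)) right

def pvDCMerge (segs : List (Int × Int)) : List (Int × Int) :=
  if segs.length ≤ 1 then segs
  else pvCombine (pvDCMerge (segs.take (segs.length / 2))) (pvDCMerge (segs.drop (segs.length / 2)))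
termination_by segs.length
decreasing_by
  · simp only [List.length_take]; omega
  · simp only [List.length_drop]; omega

def rect_from_strip_alt (y1 : Int) (y2 : Int) (segments : List (Int × Int)) : List ((Int × Int) × (Int × Int)) :=
  (pvDCMerge (PySem.List.sorted2 segments (fun p => p.1) (fun p => p.2))).map
    (fun p => ((p.1, y1), (p.2, y2)))

-- ===== PRECONDITION & SPEC =====
def Spec_rect_from_strip (y1 : Int) (y2 : Int) (segments : List (Int × Int)) (out : List ((Int × Int) × (Int × Int))) : Prop := out = rect_from_strip_alt y1 y2 segments
instance (y1 : Int) (y2 : Int) (segments : List (Int × Int)) (out : List ((Int × Int) × (Int × Int))) : Decidable (Spec_rect_from_strip y1 y2 segments out) := by unfold Spec_rect_from_strip; infer_instance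

-- ===== CLAIM (what is proved, stated in full; the proofs are below) =====
def Claim_equal_rect_from_strip : Prop := ∀ (y1 : Int) (y2 : Int) (segments : List (Int × Int)), Dom_rect_from_strip y1 y2 segments → Spec_rect_from_strip y1 y2 segments (rect_from_strip y1 y2 segments)

-- ===== LEMMAS AND PROOFS =====

-- A's whole scan, expressed on bare interval pairs
def pvMScan : List (Int × Int) → List (Int × Int)
  | [] => []
  | (a, b) :: rest => pvScanGo (a, b) rest

theorem pvScanGo_ne_nil (cur : Int × Int) (l : List (Int × Int)) : pvScanGo cur l ≠ [] := by
  induction l generalizing cur with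
  | nil => simp [pvScanGo]
  | cons h t ih =>
      obtain ⟨a, b⟩ := h
      simp only [pvScanGo]
      split
      · exact ih _
      · simp

-- A's outer/inner loops compute the decorated pvScanGo
theorem pvScanGo_eq_inner (rest : List (Int × Int)) (a b : Int) :
    pvScanGo (a, b) rest = (a, (pvInner b rest).1) :: pvMScan (pvInner b rest).2 := by
  induction rest generalizing b with
  | nil => simp [pvScanGo, pvInner, pvMScan]
  | cons h t ih =>
      obtain ⟨c, d⟩ := h
      simp only [pvScanGo, pvInner]
      split
      · exact ih _
      · simp [pvMScan]

theorem pvOuter_eq_mScan (y1 y2 : Int) : ∀ (n : Nat) (l : List (Int × Int)), l.length ≤ n →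
    pvOuter y1 y2 l = (pvMScan l).map (fun p => ((p.1, y1), (p.2, y2))) := by
  intro n
  induction n with
  | zero =>
      intro l hl
      have : l = [] := List.length_eq_zero_iff.mp (Nat.le_zero.mp hl)
      subst this; simp [pvOuter, pvMScan]
  | succ n ih =>
      intro l hl
      match l with
      | [] => simp [pvOuter, pvMScan]
      | (a, b) :: rest =>
          rw [pvOuter, pvMScan, pvScanGo_eq_inner]
          simp only [List.map_cons]
          congr 1
          exact ih _ (le_trans (pvInner_length b rest) (Nat.lt_succ_iff.mp hl))

-- appending segments continues the scan from its last interval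
theorem pvScanGo_append (xs : List (Int × Int)) :
    ∀ (c : Int × Int) (ys : List (Int × Int)),
    pvScanGo c (xs ++ ys) = (pvScanGo c xs).dropLast ++ pvScanGo ((pvScanGo c xs).getLastD (0, 0)) ys := by
  induction xs with
  | nil => intro c ys; simp [pvScanGo]
  | cons h t ih =>
      intro c ys
      obtain ⟨a, b⟩ := h
      simp only [List.cons_append, pvScanGo]
      split
      · exact ih _ ys
      · obtain ⟨q, qs, hq⟩ := List.exists_cons_of_ne_nil (pvScanGo_ne_nil (a, b) t)
        rw [ih (a, b) ys, hq]
        simp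

-- rescanning an already-merged list from any current interval is scanning the raw tail
theorem pvScanGo_scanGo (ys : List (Int × Int)) :
    ∀ (c d : Int × Int), pvScanGo c (pvScanGo d ys) = pvScanGo c (d :: ys) := by
  induction ys with
  | nil => intro c d; simp [pvScanGo]
  | cons h t ih =>
      intro c d
      obtain ⟨a, b⟩ := h
      by_cases had : a ≤ d.2
      · rw [show pvScanGo d ((a, b) :: t) = pvScanGo (d.1, max d.2 b) t by
            simp [pvScanGo, had]]
        rw [ih c (d.1, max d.2 b)]
        by_cases hdc : d.1 ≤ c.2
        · have h1 : a ≤ max c.2 d.2 := le_trans had (le_max_right _ _)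
          simp [pvScanGo, hdc, h1, max_assoc]
        · simp [pvScanGo, hdc, had]
      · rw [show pvScanGo d ((a, b) :: t) = d :: pvScanGo (a, b) t by
            simp [pvScanGo, had]]
        by_cases hdc : d.1 ≤ c.2
        · simp only [pvScanGo, hdc, if_pos]
          rw [ih (c.1, max c.2 d.2) (a, b)]
          simp [pvScanGo]
        · simp only [pvScanGo, hdc, ite_false]
          rw [ih d (a, b)]
          simp [pvScanGo, had]

theorem pvCombine_mScan (L R : List (Int × Int)) :
    pvCombine (pvMScan L) (pvMScan R) = pvMScan (L ++ R) := by
  match L with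
  | [] => simp [pvMScan, pvCombine]
  | (a, b) :: ls =>
      simp only [pvMScan, List.cons_append]
      obtain ⟨q, qs, hq⟩ := List.exists_cons_of_ne_nil (pvScanGo_ne_nil (a, b) ls)
      have key := pvScanGo_append ls (a, b) R
      rw [hq] at key ⊢
      rw [key]
      simp only [pvCombine]
      congr 1
      match R with
      | [] => simp [pvScanGo]
      | (c, d) :: rs =>
          show pvScanGo _ (pvScanGo (c, d) rs) = pvScanGo _ ((c, d) :: rs)
          exact pvScanGo_scanGo rs _ (c, d)

theorem pvDCMerge_eq_mScan : ∀ (n : Nat) (l : List (Int × Int)), l.length ≤ n →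
    pvDCMerge l = pvMScan l := by
  intro n
  induction n with
  | zero =>
      intro l hl
      have : l = [] := List.length_eq_zero_iff.mp (Nat.le_zero.mp hl)
      subst this; simp [pvDCMerge, pvMScan]
  | succ n ih =>
      intro l hl
      rw [pvDCMerge]
      by_cases h1 : l.length ≤ 1
      · rw [if_pos h1]
        match l, h1 with
        | [], _ => simp [pvMScan]
        | [(a, b)], _ => simp [pvMScan, pvScanGo]
      · rw [if_neg h1]
        have htake : (l.take (l.length / 2)).length ≤ n := by
          simp only [List.length_take]; omega
        have hdrop : (l.drop (l.length / 2)).length ≤ n := by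
          simp only [List.length_drop]; omega
        rw [ih _ htake, ih _ hdrop, pvCombine_mScan, List.take_append_drop]

-- ===== VERDICT (by name: the statement is the Claim_ definition above) =====
theorem rect_from_strip_spec : Claim_equal_rect_from_strip := by
  intro y1 y2 segments _
  unfold Spec_rect_from_strip rect_from_strip rect_from_strip_alt
  rw [pvOuter_eq_mScan y1 y2 _ _ le_rfl,
      pvDCMerge_eq_mScan _ _ (le_refl (PySem.List.sorted2 segments (fun p => p.1) (fun p => p.2)).length)]
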